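-- pv_equiv track=rewrite | github.com/mmmikolajczak/st312-data | scripts/tasks/_ml_esg_shared/normalize_labels.py | canonicalize_label_list
-- ===== SOURCE A (Python) =====
-- def normalize_label_code(value: str) -> str:
--     return str(value).strip().upper()
--
-- def canonicalize_label_list(values, allowed_labels: set[str] | None = None) -> list[str] | None:
--     if not isinstance(values, list):
--         return None
--
--     normalized = []
--     seen = set()
--     for value in values:
--         if not isinstance(value, str):
--             return None
--         label = normalize_label_code(value)
--         if not label:
--             return None
--         if allowed_labels is not None and label not in allowed_labels:
--             return None
--         if label not in seen:
--             seen.add(label)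
--             normalized.append(label)
--     return sorted(normalized)
-- ===== SOURCE B (Python) =====
-- def normalize_label_code(value: str) -> str:
--     return str(value).strip().upper()
--
-- def canonicalize_label_list(values, allowed_labels: set[str] | None = None) -> list[str] | None:
--     if not isinstance(values, list):
--         return None
--     # collect all normalized labels (duplicates included) while validating
--     labels = []
--     for value in values:
--         if not isinstance(value, str):
--             return None
--         label = normalize_label_code(value)
--         if not label:
--             return None
--         if allowed_labels is not None and label not in allowed_labels:
--             return None
--         labels.append(label)
--     # sort-based dedup: sort with duplicates, then drop adjacent repeats
--     labels.sort()
--     result = []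
--     prev = None
--     for label in labels:
--         if label != prev:
--             result.append(label)
--             prev = label
--     return result
-- ===== Notes on version B (the rewrite author's own statement) =====
-- stated objective: alternative
-- what changed: A dedups online with a hash set ('seen') while building an ordered list and sorts the deduped result; B keeps all normalized labels (duplicates included), sorts the full multiset, and removes duplicates by a linear scan that skips adjacent repeats - sort-based dedup, no set at all.
import Mathlib
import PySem

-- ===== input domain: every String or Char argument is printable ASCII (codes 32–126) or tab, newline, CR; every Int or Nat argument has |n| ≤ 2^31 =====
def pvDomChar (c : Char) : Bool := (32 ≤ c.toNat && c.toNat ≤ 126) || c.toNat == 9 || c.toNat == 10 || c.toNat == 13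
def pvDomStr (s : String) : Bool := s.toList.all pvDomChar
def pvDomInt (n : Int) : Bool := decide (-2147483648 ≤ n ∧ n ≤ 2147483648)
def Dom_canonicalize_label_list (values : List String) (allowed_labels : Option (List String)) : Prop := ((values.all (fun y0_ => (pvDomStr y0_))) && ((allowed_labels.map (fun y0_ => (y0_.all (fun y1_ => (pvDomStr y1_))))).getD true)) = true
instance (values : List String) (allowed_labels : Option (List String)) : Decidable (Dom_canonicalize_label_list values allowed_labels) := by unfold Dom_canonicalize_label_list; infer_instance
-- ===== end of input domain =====

-- B replaces A's online hash-set dedup (ordered 'normalized' list + 'seen' set, then sort) by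
-- sort-based dedup: collect all normalized labels, sort the full multiset, drop adjacent repeats.


-- ===== PORT A =====
-- shared same-module helper: str(value).strip().upper()
def normalize_label_code (value : String) : String := PySem.Str.upper (PySem.Str.strip value)

-- A's loop over `values`, carrying `normalized` and `seen`; early return = none
def canonLoopA (allowed_labels : Option (List String)) :
    List String → List String → PySem.Set String → Option (List String)
  | [], normalized, _ => some (PySem.List.sorted normalized (fun x => x) false)
  | value :: rest, normalized, seen =>
      let label := normalize_label_code value
      if label = "" then none
      else if (match allowed_labels with
               | some al => !(al.contains label)
               | none => false) then none
      else if PySem.Set.contains seen label then canonLoopA allowed_labels rest normalized seen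
      else canonLoopA allowed_labels rest (normalized ++ [label]) (PySem.Set.add seen label)

def canonicalize_label_list (values : List String) (allowed_labels : Option (List String)) : Option (List String) :=
  canonLoopA allowed_labels values [] PySem.Set.empty

-- ===== PORT B =====
-- B's first loop: validate each value and append its normalized label (duplicates kept)
def collectB (allowed_labels : Option (List String)) :
    List String → List String → Option (List String)
  | [], labels => some labels
  | value :: rest, labels =>
      let label := normalize_label_code value
      if label = "" then none
      else if (match allowed_labels with
               | some al => !(al.contains label)
               | none => false) then none
      else collectB allowed_labels rest (labels ++ [label])

-- B's second loop: skip adjacent repeats of the sorted label list (state = (result, prev))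
def dedupStep (st : List String × Option String) (label : String) : List String × Option String :=
  if some label ≠ st.2 then (st.1 ++ [label], some label) else st

def canonicalize_label_list_alt (values : List String) (allowed_labels : Option (List String)) : Option (List String) :=
  match collectB allowed_labels values [] with
  | none => none
  | some labels =>
      some ((PySem.List.sorted labels (fun x => x) false).foldl dedupStep ([], none)).1

-- ===== PRECONDITION & SPEC =====
def Spec_canonicalize_label_list (values : List String) (allowed_labels : Option (List String)) (out : Option (List String)) : Prop := out = canonicalize_label_list_alt values allowed_labels
instance (values : List String) (allowed_labels : Option (List String)) (out : Option (List String)) : Decidable (Spec_canonicalize_label_list values allowed_labels out) := by unfold Spec_canonicalize_label_list; infer_instance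

-- ===== CLAIM (what is proved, stated in full; the proofs are below) =====
def Claim_equal_canonicalize_label_list : Prop := ∀ (values : List String) (allowed_labels : Option (List String)), Dom_canonicalize_label_list values allowed_labels → Spec_canonicalize_label_list values allowed_labels (canonicalize_label_list values allowed_labels)

-- ===== LEMMAS AND PROOFS =====

-- B's collecting loop with a non-empty accumulator, factored
lemma collectB_acc (allowed_labels : Option (List String)) :
    ∀ (vs : List String) (acc : List String),
      collectB allowed_labels vs acc = (collectB allowed_labels vs []).map (acc ++ ·) := by
  intro vs
  induction vs with
  | nil => intro acc; simp [collectB]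
  | cons v rest ih =>
      intro acc
      by_cases h1 : normalize_label_code v = ""
      · simp [collectB, h1]
      · cases allowed_labels with
        | none =>
            rw [show collectB none (v :: rest) acc =
                  collectB none rest (acc ++ [normalize_label_code v]) from by simp [collectB, h1],
                show collectB none (v :: rest) [] =
                  collectB none rest [normalize_label_code v] from by simp [collectB, h1]]
            rw [ih, ih [normalize_label_code v]]
            cases collectB none rest [] <;> simp
        | some al =>
            by_cases hm : normalize_label_code v ∈ al
            · rw [show collectB (some al) (v :: rest) acc =
                    collectB (some al) rest (acc ++ [normalize_label_code v]) from by simp [collectB, h1, hm],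
                  show collectB (some al) (v :: rest) [] =
                    collectB (some al) rest [normalize_label_code v] from by simp [collectB, h1, hm]]
              rw [ih, ih [normalize_label_code v]]
              cases collectB (some al) rest [] <;> simp
            · simp [collectB, h1, hm]

-- With the invariant seen = normalized, A's loop equals B's collecting loop followed by
-- sorting after inserting the collected labels into the accumulator-set.
lemma canonLoopA_eq_collectB (allowed_labels : Option (List String)) :
    ∀ (vs : List String) (acc : List String),
      canonLoopA allowed_labels vs acc acc =
        (collectB allowed_labels vs []).map
          (fun ls => PySem.List.sorted (PySem.Set.update acc ls) (fun x => x) false) := by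
  intro vs
  induction vs with
  | nil => intro acc; simp [canonLoopA, collectB, PySem.Set.update]
  | cons v rest ih =>
      intro acc
      by_cases h1 : normalize_label_code v = ""
      · simp [canonLoopA, collectB, h1]
      · cases allowed_labels with
        | none =>
            have key : canonLoopA none (v :: rest) acc acc =
                canonLoopA none rest (PySem.Set.add acc (normalize_label_code v))
                  (PySem.Set.add acc (normalize_label_code v)) := by
              by_cases hc : normalize_label_code v ∈ acc
              · simp [canonLoopA, h1, PySem.Set.contains, PySem.Set.add, hc]
              · simp [canonLoopA, h1, PySem.Set.contains, PySem.Set.add, hc]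
            rw [key, ih]
            rw [show collectB none (v :: rest) [] =
                  collectB none rest [normalize_label_code v] from by simp [collectB, h1]]
            rw [collectB_acc none rest [normalize_label_code v]]
            cases collectB none rest [] <;> simp [PySem.Set.update]
        | some al =>
            by_cases hm : normalize_label_code v ∈ al
            · have key : canonLoopA (some al) (v :: rest) acc acc =
                  canonLoopA (some al) rest (PySem.Set.add acc (normalize_label_code v))
                    (PySem.Set.add acc (normalize_label_code v)) := by
                by_cases hc : normalize_label_code v ∈ acc
                · simp [canonLoopA, h1, hm, PySem.Set.contains, PySem.Set.add, hc]
                · simp [canonLoopA, h1, hm, PySem.Set.contains, PySem.Set.add, hc]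
              rw [key, ih]
              rw [show collectB (some al) (v :: rest) [] =
                    collectB (some al) rest [normalize_label_code v] from by simp [collectB, h1, hm]]
              rw [collectB_acc (some al) rest [normalize_label_code v]]
              cases collectB (some al) rest [] <;> simp [PySem.Set.update]
            · simp [canonLoopA, collectB, h1, hm]

-- Invariant of B's dedup fold over a (≤)-sorted tail: the result stays strictly increasing
-- and collects exactly the elements seen so far.
lemma dedup_fold_invariant :
    ∀ (s res : List String) (p : String),
      s.Pairwise (· ≤ ·) → (∀ x ∈ s, p ≤ x) → (∀ x ∈ res, x ≤ p) →
      res.Pairwise (· < ·) → p ∈ res →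
      (s.foldl dedupStep (res, some p)).1.Pairwise (· < ·) ∧
      (∀ x, x ∈ (s.foldl dedupStep (res, some p)).1 ↔ x ∈ res ∨ x ∈ s) := by
  intro s
  induction s with
  | nil => intro res p _ _ _ hres _; exact ⟨hres, by simp⟩
  | cons l rest ih =>
      intro res p hpw hge hle hres hmem
      have hpl : p ≤ l := hge l (by simp)
      have hrest_pw : rest.Pairwise (· ≤ ·) := hpw.of_cons
      have hhead : ∀ x ∈ rest, l ≤ x := fun x hx => (List.pairwise_cons.mp hpw).1 x hx
      by_cases heq : l = p
      · -- adjacent repeat: state unchanged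
        have : dedupStep (res, some p) l = (res, some p) := by
          simp [dedupStep, heq]
        rw [List.foldl_cons, this]
        have hge' : ∀ x ∈ rest, p ≤ x := fun x hx => heq ▸ hhead x hx
        obtain ⟨h1, h2⟩ := ih res p hrest_pw hge' hle hres hmem
        refine ⟨h1, fun x => ?_⟩
        rw [h2]
        constructor
        · rintro (h | h)
          · exact Or.inl h
          · exact Or.inr (List.mem_cons_of_mem _ h)
        · rintro (h | h)
          · exact Or.inl h
          · rcases List.mem_cons.mp h with h | h
            · subst h; subst heq; exact Or.inl hmem
            · exact Or.inr h
      · -- new label: append it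
        have hplt : p < l := lt_of_le_of_ne hpl (fun h => heq h.symm)
        have : dedupStep (res, some p) l = (res ++ [l], some l) := by
          simp [dedupStep, fun h : l = p => heq h]
        rw [List.foldl_cons, this]
        have hle' : ∀ x ∈ res ++ [l], x ≤ l := by
          intro x hx
          rcases List.mem_append.mp hx with h | h
          · exact le_of_lt (lt_of_le_of_lt (hle x h) hplt)
          · simp at h; simp [h]
        have hres' : (res ++ [l]).Pairwise (· < ·) := by
          rw [List.pairwise_append]
          exact ⟨hres, List.pairwise_singleton _ _,
            fun a ha b hb => by simp at hb; subst hb; exact lt_of_le_of_lt (hle a ha) hplt⟩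
        obtain ⟨h1, h2⟩ := ih (res ++ [l]) l hrest_pw hhead hle' hres' (by simp)
        refine ⟨h1, fun x => ?_⟩
        rw [h2]
        simp only [List.mem_append, List.mem_cons]
        tauto

-- B's dedup of the sorted multiset IS the sorted set of labels.
lemma dedup_sorted_eq (ls : List String) :
    ((PySem.List.sorted ls (fun x => x) false).foldl dedupStep ([], none)).1 =
      PySem.List.sorted (PySem.Set.ofList ls) (fun x => x) false := by
  rcases hs : PySem.List.sorted ls (fun x => x) false with _ | ⟨m, t⟩
  · have hnil : ls = [] := by
      have := PySem.List.sorted_eq_nil_iff (xs := ls) (key := fun x => x) (rev := false)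
      exact this.mp hs
    simp [hnil, PySem.Set.ofList, PySem.List.sorted]
  · -- first iteration: prev = none ≠ some m, so state becomes ([m], some m)
    have hpw : (m :: t).Pairwise (fun a b => a ≤ b) := by
      have := PySem.List.sorted_pairwise (xs := ls) (key := fun x => x)
      rw [hs] at this; simpa using this
    have hstep : dedupStep ([], none) m = ([m], some m) := by simp [dedupStep]
    rw [List.foldl_cons, hstep]
    obtain ⟨h1, h2⟩ := dedup_fold_invariant t [m] m hpw.of_cons
      (fun x hx => (List.pairwise_cons.mp hpw).1 x hx)
      (by simp) (List.pairwise_singleton _ _) (by simp)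
    -- identify with sorted(set(ls)) via perm + strict order
    symm
    apply PySem.List.sorted_eq_of_perm_of_pairwise_lt
    · -- perm: both nodup with the same members
      have hnodup_out : (t.foldl dedupStep ([m], some m)).1.Nodup :=
        h1.imp ne_of_lt
      have hmem_out : ∀ x, x ∈ (t.foldl dedupStep ([m], some m)).1 ↔ x ∈ ls := by
        intro x
        rw [h2 x]
        rw [← PySem.List.mem_sorted (xs := ls) (key := fun x => x) (rev := false), hs]
        simp

      rw [List.perm_ext_iff_of_nodup hnodup_out (PySem.Set.nodup_ofList ls)]
      intro x
      rw [hmem_out x, PySem.Set.mem_ofList]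
    · simpa using h1

-- ===== VERDICT (by name: the statement is the Claim_ definition above) =====
theorem canonicalize_label_list_spec : Claim_equal_canonicalize_label_list := by
  intro values allowed_labels _
  unfold Spec_canonicalize_label_list canonicalize_label_list canonicalize_label_list_alt
  rw [show (PySem.Set.empty : PySem.Set String) = ([] : List String) from rfl,
      canonLoopA_eq_collectB allowed_labels values []]
  cases h : collectB allowed_labels values [] with
  | none => simp
  | some ls =>
      simp only [Option.map_some]
      rw [dedup_sorted_eq ls, PySem.Set.ofList_eq_foldl]
      rfl
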